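-- pv_equiv track=rewrite | github.com/boois/boois_cmd_parser | vali_rule_chker.py | guid_chker
-- ===== SOURCE A (Python) =====
-- def guid_chker(val):  # 32位无横杠guid,36位带横杠guid;,,,;但至少要带一个逗号
--     if not val:
--         return False
--     if not isinstance(val, str):
--         return False
--     val = val.strip()
--     if len(val) != 32 and len(val) != 36:
--         return False
--     if len(val) == 36:
--         group = val.split("-")
--         if len(group) != 5:
--             return False
--         else:  # e1495b94-2d00-46ca-a88f-5b2eeb4fc458
--             if len(group[0]) != 8 \
--                     or len(group[1]) != 4 \
--                     or len(group[2]) != 4 \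
--                     or len(group[3]) != 4 \
--                     or len(group[4]) != 12:
--                 return False
--     filter_result = [_ for _ in val.strip().lower() if
--                      _ in ["a", "b", "c", "d", "e", "f", "0", "1", "2", "3", "4", "5", "6", "7", "8", "9"]]
--
--     if len(filter_result) != 32:
--         return False
--     return True
-- ===== SOURCE B (Python) =====
-- def guid_chker(val):
--     if not val:
--         return False
--     if not isinstance(val, str):
--         return False
--     s = val.strip()
--     templates = {32: "x" * 32, 36: "xxxxxxxx-xxxx-xxxx-xxxx-xxxxxxxxxxxx"}
--     t = templates.get(len(s))
--     if t is None:
--         return False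
--     return all(c == "-" if m == "-" else c.lower() in "0123456789abcdef"
--                for c, m in zip(s, t))
-- ===== Notes on version B (the rewrite author's own statement) =====
-- stated objective: alternative
-- what changed: Replaces A's split-into-groups/group-length checks and the hex filter-and-count with table-driven template matching: a dict maps the stripped length to a mask string ('x'*32 or the dashed 36-char mask) and the value is accepted iff every character matches its mask position (literal '-' or hex).
import Mathlib
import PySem

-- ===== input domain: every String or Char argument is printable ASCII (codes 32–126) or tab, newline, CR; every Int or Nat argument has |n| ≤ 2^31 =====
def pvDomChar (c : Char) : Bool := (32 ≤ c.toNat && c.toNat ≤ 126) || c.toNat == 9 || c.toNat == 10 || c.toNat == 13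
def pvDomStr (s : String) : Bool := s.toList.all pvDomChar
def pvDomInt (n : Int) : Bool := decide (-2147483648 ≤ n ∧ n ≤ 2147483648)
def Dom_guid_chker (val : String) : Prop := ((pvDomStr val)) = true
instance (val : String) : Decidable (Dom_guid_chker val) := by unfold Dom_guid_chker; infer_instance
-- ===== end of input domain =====

-- B replaces A's split-into-groups/length checks and hex filter-and-count by table-driven template
-- matching: a dict maps the stripped length to a mask ('x'*32 or the dashed 36-char mask) and each
-- character is checked against its mask position; an alternative decomposition of the same cost.

-- ===== PORT A =====
-- the literal list A's comprehension tests membership in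
def pyAHexList : List Char :=
  ['a', 'b', 'c', 'd', 'e', 'f', '0', '1', '2', '3', '4', '5', '6', '7', '8', '9']

def guid_chker (val : String) : Bool :=
  if val.toList = [] then false          -- if not val: return False
  else
    let v := PySem.Chars.strip val.toList            -- val = val.strip()
    if v.length ≠ 32 ∧ v.length ≠ 36 then false
    else
      let ok36 : Bool :=                 -- the len == 36 block (early returns folded into one Bool)
        if v.length = 36 then
          let group := PySem.Chars.splitOn v ['-']
          if group.length ≠ 5 then false
          else if (group.getD 0 []).length ≠ 8 ∨ (group.getD 1 []).length ≠ 4 ∨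
                  (group.getD 2 []).length ≠ 4 ∨ (group.getD 3 []).length ≠ 4 ∨
                  (group.getD 4 []).length ≠ 12 then false
          else true
        else true
      if ok36 = false then false
      else
        -- filter_result = [_ for _ in val.strip().lower() if _ in [...]]
        let filter_result := (PySem.Chars.lower (PySem.Chars.strip v)).filter (fun c => c ∈ pyAHexList)
        if filter_result.length ≠ 32 then false else true

-- ===== PORT B =====
def pyBHexList : List Char :=
  ['0', '1', '2', '3', '4', '5', '6', '7', '8', '9', 'a', 'b', 'c', 'd', 'e', 'f']

def pvT32 : List Char := List.replicate 32 'x'                       -- "x" * 32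
def pvT36 : List Char := "xxxxxxxx-xxxx-xxxx-xxxx-xxxxxxxxxxxx".toList

-- the per-position test of the generator: c == "-" if m == "-" else c.lower() in "0123…f"
def pvTpl (p : Char × Char) : Bool :=
  if p.2 = '-' then decide (p.1 = '-') else decide (PySem.Chars.lowerChar p.1 ∈ pyBHexList)

def guid_chker_alt (val : String) : Bool :=
  if val.toList = [] then false
  else
    -- templates = {32: "x"*32, 36: "xxxxxxxx-…"}; t = templates.get(len(s))
    match (PySem.Dict.ofList [((32 : Int), pvT32), ((36 : Int), pvT36)]).get?
        ((PySem.Chars.strip val.toList).length : Int) with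
    | none => false                                         -- if t is None: return False
    | some t => ((PySem.Chars.strip val.toList).zip t).all pvTpl   -- all(... for c, m in zip(s, t))

-- ===== PRECONDITION & SPEC =====
def Spec_guid_chker (val : String) (out : Bool) : Prop := out = guid_chker_alt val
instance (val : String) (out : Bool) : Decidable (Spec_guid_chker val out) := by unfold Spec_guid_chker; infer_instance

-- ===== CLAIM (what is proved, stated in full; the proofs are below) =====
def Claim_equal_guid_chker : Prop := ∀ (val : String), Dom_guid_chker val → Spec_guid_chker val (guid_chker val)

-- ===== LEMMAS AND PROOFS =====

-- ---- strip is idempotent ----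
theorem pv_dw_idem {α : Type} (p : α → Bool) (l : List α) :
    List.dropWhile p (List.dropWhile p l) = List.dropWhile p l := by
  rw [List.dropWhile_eq_self_iff]
  intro hl
  have h := List.head?_dropWhile_not p l
  rw [List.head?_eq_getElem?, List.getElem?_eq_getElem hl] at h
  simpa using h

theorem pv_head_lstrip_false (l : List Char) (hl : 0 < (PySem.Chars.lstrip l).length) :
    PySem.Chars.isspace (PySem.Chars.lstrip l)[0] = false := by
  unfold PySem.Chars.lstrip at *
  have h := List.head?_dropWhile_not PySem.Chars.isspace l
  rw [List.head?_eq_getElem?, List.getElem?_eq_getElem hl] at h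
  simpa using h

theorem pv_lstrip_strip (l : List Char) :
    PySem.Chars.lstrip (PySem.Chars.strip l) = PySem.Chars.strip l := by
  unfold PySem.Chars.strip
  rw [PySem.Chars.lstrip, List.dropWhile_eq_self_iff]
  intro hl
  have hpre : PySem.Chars.rstrip (PySem.Chars.lstrip l) <+: PySem.Chars.lstrip l := by
    unfold PySem.Chars.rstrip
    rw [← List.reverse_suffix]
    simpa using List.dropWhile_suffix _
  have hlen : 0 < (PySem.Chars.lstrip l).length := lt_of_lt_of_le hl hpre.length_le
  have := hpre.getElem (i := 0) hl
  rw [this]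
  simp only [Bool.not_eq_true]; exact pv_head_lstrip_false l hlen

theorem pv_strip_strip (l : List Char) :
    PySem.Chars.strip (PySem.Chars.strip l) = PySem.Chars.strip l := by
  conv_lhs => rw [PySem.Chars.strip, pv_lstrip_strip]
  rw [PySem.Chars.strip, PySem.Chars.rstrip, PySem.Chars.rstrip]
  rw [List.reverse_reverse, pv_dw_idem]

-- ---- characterisation of A's val.split("-") ----
def pvSplit (l cur : List Char) : List (List Char) :=
  match l with
  | [] => [cur.reverse]
  | c :: rest => if c = '-' then cur.reverse :: pvSplit rest [] else pvSplit rest (c :: cur)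

def pvJoinDash : List (List Char) → List Char
  | [] => []
  | [g] => g
  | g :: gs => g ++ '-' :: pvJoinDash gs

theorem pv_go_spec (fuel : Nat) (l cur : List Char) (acc : List (List Char))
    (h : l.length < fuel) :
    PySem.Chars.splitOn.go ['-'] fuel l cur acc = acc.reverse ++ pvSplit l cur := by
  induction fuel generalizing l cur acc with
  | zero => omega
  | succ f ih =>
    cases l with
    | nil => simp [PySem.Chars.splitOn.go, pvSplit]
    | cons c rest =>
      rw [PySem.Chars.splitOn.go]
      by_cases hc : c = '-'
      · subst hc
        have hp : List.isPrefixOf ['-'] ('-' :: rest) = true := by simp [List.isPrefixOf]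
        simp only [hp, if_pos]
        rw [ih _ _ _ (by simp at h ⊢; omega)]
        simp [pvSplit]
      · have hp : List.isPrefixOf ['-'] (c :: rest) = false := by
          simp [List.isPrefixOf, BEq.beq]
          intro hcc
          exact absurd hcc.symm hc
        simp only [hp]
        rw [if_neg (by simp)]
        rw [ih _ _ _ (by simp at h ⊢; omega)]
        simp [pvSplit, hc]

theorem pv_splitOn_eq (l : List Char) :
    PySem.Chars.splitOn l ['-'] = pvSplit l [] := by
  rw [PySem.Chars.splitOn, pv_go_spec _ _ _ _ (by omega)]
  simp

theorem pv_split_ne_nil (l cur : List Char) : pvSplit l cur ≠ [] := by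
  induction l generalizing cur with
  | nil => simp [pvSplit]
  | cons c rest ih =>
    rw [pvSplit]
    by_cases hc : c = '-'
    · simp [hc]
    · rw [if_neg hc]; exact ih _

theorem pv_joinDash_cons (g : List Char) (gs : List (List Char)) (h : gs ≠ []) :
    pvJoinDash (g :: gs) = g ++ '-' :: pvJoinDash gs := by
  cases gs with
  | nil => exact absurd rfl h
  | cons a t => rfl

theorem pv_join_split (l cur : List Char) :
    pvJoinDash (pvSplit l cur) = cur.reverse ++ l := by
  induction l generalizing cur with
  | nil => simp [pvSplit, pvJoinDash]
  | cons c rest ih =>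
    rw [pvSplit]
    by_cases hc : c = '-'
    · subst hc
      rw [if_pos rfl, pv_joinDash_cons _ _ (pv_split_ne_nil _ _), ih]
      simp
    · rw [if_neg hc, ih]
      simp

theorem pv_split_append (g l cur : List Char) (hg : '-' ∉ g) :
    pvSplit (g ++ l) cur = pvSplit l (g.reverse ++ cur) := by
  induction g generalizing cur with
  | nil => simp
  | cons c g' ih =>
    have hc : c ≠ '-' := fun h => hg (h ▸ List.mem_cons_self)
    rw [List.cons_append, pvSplit, if_neg hc,
        ih (c :: cur) (fun h => hg (List.mem_cons_of_mem _ h))]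
    simp

theorem pv_split_dash (l cur : List Char) :
    pvSplit ('-' :: l) cur = cur.reverse :: pvSplit l [] := by
  rw [pvSplit]; simp

theorem pv_split_decomp (g0 g1 g2 g3 g4 : List Char)
    (n0 : '-' ∉ g0) (n1 : '-' ∉ g1) (n2 : '-' ∉ g2) (n3 : '-' ∉ g3) (n4 : '-' ∉ g4) :
    pvSplit (g0 ++ '-' :: (g1 ++ '-' :: (g2 ++ '-' :: (g3 ++ '-' :: g4)))) [] =
      [g0, g1, g2, g3, g4] := by
  rw [pv_split_append _ _ _ n0, pv_split_dash]
  rw [pv_split_append _ _ _ n1, pv_split_dash]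
  rw [pv_split_append _ _ _ n2, pv_split_dash]
  rw [pv_split_append _ _ _ n3, pv_split_dash]
  have h4 : pvSplit g4 [] = [g4] := by
    have := pv_split_append g4 [] [] n4
    rw [List.append_nil] at this
    rw [this]
    simp [pvSplit]
  rw [h4]
  simp

-- ---- the hex-character test of A and of B agree ----
theorem pv_mem_hex (c : Char) : c ∈ pyAHexList ↔ c ∈ pyBHexList := by
  simp [pyAHexList, pyBHexList]; tauto

theorem pv_grp (u : List Char) :
    (List.filter (fun c => decide (c ∈ pyAHexList)) u).length = u.length ↔
      u.all (fun c => decide (c ∈ pyBHexList)) = true := by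
  rw [List.length_filter_eq_length_iff]
  simp [pv_mem_hex]

def pvAllHex (g : List Char) : Bool := (PySem.Chars.lower g).all (fun c => decide (c ∈ pyBHexList))

theorem pv_allhex_iff (g : List Char) :
    pvAllHex g = true ↔ ∀ c ∈ g, PySem.Chars.lowerChar c ∈ pyBHexList := by
  simp [pvAllHex, PySem.Chars.lower]

theorem pv_nodash_of_all (g : List Char) (h : pvAllHex g = true) : '-' ∉ g := by
  intro hd
  have : PySem.Chars.lowerChar '-' ∈ PySem.Chars.lower g := List.mem_map_of_mem hd
  have h2 := List.all_eq_true.mp h _ this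
  revert h2
  decide

theorem pv_lower_append (a b : List Char) :
    PySem.Chars.lower (a ++ b) = PySem.Chars.lower a ++ PySem.Chars.lower b := by
  simp [PySem.Chars.lower]

theorem pv_lower_cons (c : Char) (b : List Char) :
    PySem.Chars.lower (c :: b) = PySem.Chars.lowerChar c :: PySem.Chars.lower b := by
  simp [PySem.Chars.lower]

theorem pv_lower_length (a : List Char) : (PySem.Chars.lower a).length = a.length := by
  simp [PySem.Chars.lower]

theorem pv_dash_not_hexA : (decide ('-' ∈ pyAHexList)) = false := by decide

theorem pv_filter_decomp (g0 g1 g2 g3 g4 : List Char) :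
    (List.filter (fun c => decide (c ∈ pyAHexList))
      (PySem.Chars.lower (g0 ++ '-' :: (g1 ++ '-' :: (g2 ++ '-' :: (g3 ++ '-' :: g4)))))).length =
    (List.filter (fun c => decide (c ∈ pyAHexList)) (PySem.Chars.lower g0)).length +
    (List.filter (fun c => decide (c ∈ pyAHexList)) (PySem.Chars.lower g1)).length +
    (List.filter (fun c => decide (c ∈ pyAHexList)) (PySem.Chars.lower g2)).length +
    (List.filter (fun c => decide (c ∈ pyAHexList)) (PySem.Chars.lower g3)).length +
    (List.filter (fun c => decide (c ∈ pyAHexList)) (PySem.Chars.lower g4)).length := by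
  simp only [pv_lower_append, pv_lower_cons, List.filter_append, List.filter_cons]
  have hd : PySem.Chars.lowerChar '-' = '-' := by decide
  rw [hd]
  simp [pv_dash_not_hexA]
  omega

theorem pv_count_iff (g0 g1 g2 g3 g4 : List Char)
    (h0 : g0.length = 8) (h1 : g1.length = 4) (h2 : g2.length = 4)
    (h3 : g3.length = 4) (h4 : g4.length = 12) :
    (List.filter (fun c => decide (c ∈ pyAHexList))
      (PySem.Chars.lower (g0 ++ '-' :: (g1 ++ '-' :: (g2 ++ '-' :: (g3 ++ '-' :: g4)))))).length = 32 ↔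
    (pvAllHex g0 = true ∧ pvAllHex g1 = true ∧ pvAllHex g2 = true ∧ pvAllHex g3 = true ∧ pvAllHex g4 = true) := by
  rw [pv_filter_decomp]
  have e0 := pv_grp (PySem.Chars.lower g0)
  have e1 := pv_grp (PySem.Chars.lower g1)
  have e2 := pv_grp (PySem.Chars.lower g2)
  have e3 := pv_grp (PySem.Chars.lower g3)
  have e4 := pv_grp (PySem.Chars.lower g4)
  have l0 := pv_lower_length g0; have l1 := pv_lower_length g1
  have l2 := pv_lower_length g2; have l3 := pv_lower_length g3
  have l4 := pv_lower_length g4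
  have b0 := List.length_filter_le (fun c => decide (c ∈ pyAHexList)) (PySem.Chars.lower g0)
  have b1 := List.length_filter_le (fun c => decide (c ∈ pyAHexList)) (PySem.Chars.lower g1)
  have b2 := List.length_filter_le (fun c => decide (c ∈ pyAHexList)) (PySem.Chars.lower g2)
  have b3 := List.length_filter_le (fun c => decide (c ∈ pyAHexList)) (PySem.Chars.lower g3)
  have b4 := List.length_filter_le (fun c => decide (c ∈ pyAHexList)) (PySem.Chars.lower g4)
  unfold pvAllHex
  constructor
  · intro hsum
    exact ⟨e0.mp (by omega), e1.mp (by omega), e2.mp (by omega), e3.mp (by omega), e4.mp (by omega)⟩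
  · rintro ⟨a0, a1, a2, a3, a4⟩
    have := e0.mpr a0; have := e1.mpr a1; have := e2.mpr a2
    have := e3.mpr a3; have := e4.mpr a4
    omega

theorem pv_parts (v g0 g1 g2 g3 g4 : List Char)
    (hv : v = g0 ++ '-' :: (g1 ++ '-' :: (g2 ++ '-' :: (g3 ++ '-' :: g4))))
    (h0 : g0.length = 8) (h1 : g1.length = 4) (h2 : g2.length = 4)
    (h3 : g3.length = 4) :
    v.getD 8 ' ' = '-' ∧ v.getD 13 ' ' = '-' ∧ v.getD 18 ' ' = '-' ∧ v.getD 23 ' ' = '-' ∧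
    v.take 8 = g0 ∧ (v.drop 9).take 4 = g1 ∧ (v.drop 14).take 4 = g2 ∧
    (v.drop 19).take 4 = g3 ∧ v.drop 24 = g4 := by
  have hd8 : v.drop 8 = '-' :: (g1 ++ '-' :: (g2 ++ '-' :: (g3 ++ '-' :: g4))) := by
    rw [hv]; exact List.drop_left' h0
  have hd9 : v.drop 9 = g1 ++ '-' :: (g2 ++ '-' :: (g3 ++ '-' :: g4)) := by
    have : v.drop 9 = (v.drop 8).drop 1 := by rw [List.drop_drop]
    rw [this, hd8]; rfl
  have hd13 : v.drop 13 = '-' :: (g2 ++ '-' :: (g3 ++ '-' :: g4)) := by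
    have : v.drop 13 = (v.drop 9).drop 4 := by rw [List.drop_drop]
    rw [this, hd9]; exact List.drop_left' h1
  have hd14 : v.drop 14 = g2 ++ '-' :: (g3 ++ '-' :: g4) := by
    have : v.drop 14 = (v.drop 13).drop 1 := by rw [List.drop_drop]
    rw [this, hd13]; rfl
  have hd18 : v.drop 18 = '-' :: (g3 ++ '-' :: g4) := by
    have : v.drop 18 = (v.drop 14).drop 4 := by rw [List.drop_drop]
    rw [this, hd14]; exact List.drop_left' h2
  have hd19 : v.drop 19 = g3 ++ '-' :: g4 := by
    have : v.drop 19 = (v.drop 18).drop 1 := by rw [List.drop_drop]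
    rw [this, hd18]; rfl
  have hd23 : v.drop 23 = '-' :: g4 := by
    have : v.drop 23 = (v.drop 19).drop 4 := by rw [List.drop_drop]
    rw [this, hd19]; exact List.drop_left' h3
  have hd24 : v.drop 24 = g4 := by
    have : v.drop 24 = (v.drop 23).drop 1 := by rw [List.drop_drop]
    rw [this, hd23]
    rfl
  have g8 : v.getD 8 ' ' = '-' := by
    rw [List.getD_eq_getElem?_getD, show v[8]? = (v.drop 8)[0]? by rw [List.getElem?_drop], hd8]
    rfl
  have g13 : v.getD 13 ' ' = '-' := by
    rw [List.getD_eq_getElem?_getD, show v[13]? = (v.drop 13)[0]? by rw [List.getElem?_drop], hd13]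
    rfl
  have g18 : v.getD 18 ' ' = '-' := by
    rw [List.getD_eq_getElem?_getD, show v[18]? = (v.drop 18)[0]? by rw [List.getElem?_drop], hd18]
    rfl
  have g23 : v.getD 23 ' ' = '-' := by
    rw [List.getD_eq_getElem?_getD, show v[23]? = (v.drop 23)[0]? by rw [List.getElem?_drop], hd23]
    rfl
  refine ⟨g8, g13, g18, g23, ?_, ?_, ?_, ?_, hd24⟩
  · rw [hv]; exact List.take_left' h0
  · rw [hd9]; exact List.take_left' h1
  · rw [hd14]; exact List.take_left' h2
  · rw [hd19]; exact List.take_left' h3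

theorem pv_decomp_rev (v : List Char) (h36 : v.length = 36)
    (d8 : v.getD 8 ' ' = '-') (d13 : v.getD 13 ' ' = '-')
    (d18 : v.getD 18 ' ' = '-') (d23 : v.getD 23 ' ' = '-') :
    v = v.take 8 ++ '-' :: ((v.drop 9).take 4 ++ '-' :: ((v.drop 14).take 4 ++ '-' ::
      ((v.drop 19).take 4 ++ '-' :: v.drop 24))) ∧
    (v.take 8).length = 8 ∧ ((v.drop 9).take 4).length = 4 ∧ ((v.drop 14).take 4).length = 4 ∧
    ((v.drop 19).take 4).length = 4 ∧ (v.drop 24).length = 12 := by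
  have e8 : v[8] = '-' := by
    rw [List.getD_eq_getElem?_getD, List.getElem?_eq_getElem (by omega)] at d8
    simpa using d8
  have e13 : v[13] = '-' := by
    rw [List.getD_eq_getElem?_getD, List.getElem?_eq_getElem (by omega)] at d13
    simpa using d13
  have e18 : v[18] = '-' := by
    rw [List.getD_eq_getElem?_getD, List.getElem?_eq_getElem (by omega)] at d18
    simpa using d18
  have e23 : v[23] = '-' := by
    rw [List.getD_eq_getElem?_getD, List.getElem?_eq_getElem (by omega)] at d23
    simpa using d23
  refine ⟨?_, by simp [h36], by simp [h36], by simp [h36], by simp [h36], by simp [h36]⟩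
  conv_lhs => rw [← List.take_append_drop 8 v]
  rw [List.drop_eq_getElem_cons (by omega), e8]
  congr 1
  congr 1
  conv_lhs => rw [← List.take_append_drop 4 (v.drop 9)]
  rw [List.drop_drop, show (9 + 4 : Nat) = 13 from rfl,
      List.drop_eq_getElem_cons (i := 13) (by omega), e13]
  congr 1
  congr 1
  conv_lhs => rw [← List.take_append_drop 4 (v.drop 14)]
  rw [List.drop_drop, show (14 + 4 : Nat) = 18 from rfl,
      List.drop_eq_getElem_cons (i := 18) (by omega), e18]
  congr 1
  congr 1
  conv_lhs => rw [← List.take_append_drop 4 (v.drop 19)]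
  rw [List.drop_drop, show (19 + 4 : Nat) = 23 from rfl,
      List.drop_eq_getElem_cons (i := 23) (by omega), e23]

theorem pv_ifs_iff (P Q R : Prop) [Decidable P] [Decidable Q] [Decidable R] :
    ((if (if P then false else if Q then false else true) = false then false
      else if R then false else true) = true) ↔ (¬P ∧ ¬Q ∧ ¬R) := by
  split_ifs <;> simp_all

theorem pv_len5 {α : Type} (l : List α) (h : l.length = 5) :
    ∃ a b c d e : α, l = [a, b, c, d, e] := by
  rcases l with _ | ⟨a, _ | ⟨b, _ | ⟨c, _ | ⟨d, _ | ⟨e, _ | ⟨f, t⟩⟩⟩⟩⟩⟩ <;> simp at h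
  exact ⟨a, b, c, d, e, rfl⟩

-- ---- facts about B's templates ----
theorem pv_get_tpl (n : Nat) :
    (PySem.Dict.ofList [((32 : Int), pvT32), ((36 : Int), pvT36)]).get? (n : Int) =
      if n = 32 then some pvT32 else if n = 36 then some pvT36 else none := by
  rw [show (PySem.Dict.ofList [((32 : Int), pvT32), ((36 : Int), pvT36)]) =
      PySem.Dict.mk [((32 : Int), pvT32), ((36 : Int), pvT36)] from by decide]
  rw [PySem.Dict.get?_mk_cons, PySem.Dict.get?_mk_cons]
  by_cases h32 : n = 32
  · simp [h32]
  · by_cases h36 : n = 36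
    · simp [h36]
    · rw [if_neg h32, if_neg h36]
      split_ifs with ha hb
      · exfalso; simp at ha; omega
      · exfalso; simp at hb; omega
      · rfl

theorem pvT36_len : pvT36.length = 36 := by decide

theorem pvT36_dashes :
    pvT36[8]'(by decide) = '-' ∧ pvT36[13]'(by decide) = '-' ∧
    pvT36[18]'(by decide) = '-' ∧ pvT36[23]'(by decide) = '-' := by decide

theorem pvT36_x : ∀ i, i < 36 → i ≠ 8 → i ≠ 13 → i ≠ 18 → i ≠ 23 → pvT36.getD i ' ' = 'x' := by
  decide

-- zip against a long-enough constant list is a map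
theorem pv_zip_rep (v : List Char) (n : Nat) (m : Char) (h : v.length ≤ n) :
    v.zip (List.replicate n m) = v.map (fun c => (c, m)) := by
  induction v generalizing n with
  | nil => simp
  | cons c rest ih =>
    cases n with
    | zero => simp at h
    | succ k =>
      simp only [List.replicate_succ, List.zip_cons_cons, List.map_cons]
      rw [ih k (by simpa using h)]

-- zip-all over a same-length template, pointwise
theorem pv_zip_all_iff (v t : List Char) (h : v.length = t.length) :
    ((v.zip t).all pvTpl = true) ↔
      ∀ i (hi : i < v.length), pvTpl (v[i], t[i]'(h ▸ hi)) = true := by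
  rw [List.all_eq_true]
  constructor
  · intro hall i hi
    have hz : i < (v.zip t).length := by simp [List.length_zip, h]; omega
    have := hall (v.zip t)[i] (List.getElem_mem hz)
    rwa [List.getElem_zip] at this
  · intro hpt x hx
    obtain ⟨i, hi, hxe⟩ := List.mem_iff_getElem.mp hx
    have hiv : i < v.length := by simp [List.length_zip] at hi; omega
    rw [← hxe, List.getElem_zip]
    exact hpt i hiv

-- B's 32-template check is exactly "all hex after lowering"
theorem pv_zip32 (v : List Char) (h32 : v.length = 32) :
    (v.zip pvT32).all pvTpl = pvAllHex v := by
  rw [pvT32, pv_zip_rep v 32 'x' (by omega), List.all_map, pvAllHex,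
      PySem.Chars.lower, List.all_map]
  congr 1

-- index arithmetic for the five mask regions
theorem pv_getD_eq (v : List Char) (i : Nat) (h : i < v.length) (d : Char) :
    v.getD i d = v[i] := by
  rw [List.getD_eq_getElem?_getD, List.getElem?_eq_getElem h]
  rfl

theorem pv_mem_part (v : List Char) (s t : Nat) (c : Char) (hc : c ∈ (v.drop s).take t) :
    ∃ i, ∃ h : i < v.length, s ≤ i ∧ i - s < t ∧ v[i]'h = c := by
  obtain ⟨j, hj, he⟩ := List.mem_iff_getElem.mp hc
  have hj' : j < t ∧ s + j < v.length := by
    simp only [List.length_take, List.length_drop, lt_min_iff] at hj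
    omega
  rw [List.getElem_take, List.getElem_drop] at he
  exact ⟨s + j, hj'.2, by omega, by omega, he⟩

theorem pv_part_mem (v : List Char) (s t i : Nat) (his : s ≤ i) (hit : i - s < t)
    (h : i < v.length) : v[i] ∈ (v.drop s).take t := by
  have he : ((v.drop s).take t)[i - s]'(by
      simp only [List.length_take, List.length_drop, lt_min_iff]; omega) = v[i] := by
    rw [List.getElem_take, List.getElem_drop]
    congr 1
    omega
  exact he ▸ List.getElem_mem _

-- B's 36-template check, characterised by dashes + hex groups
theorem pv_zip36 (v : List Char) (h36 : v.length = 36) :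
    ((v.zip pvT36).all pvTpl = true) ↔
      (v.getD 8 ' ' = '-' ∧ v.getD 13 ' ' = '-' ∧ v.getD 18 ' ' = '-' ∧ v.getD 23 ' ' = '-' ∧
       pvAllHex (v.take 8) = true ∧ pvAllHex ((v.drop 9).take 4) = true ∧
       pvAllHex ((v.drop 14).take 4) = true ∧ pvAllHex ((v.drop 19).take 4) = true ∧
       pvAllHex (v.drop 24) = true) := by
  have hlen : v.length = pvT36.length := by rw [h36, pvT36_len]
  rw [pv_zip_all_iff v pvT36 hlen]
  have htk : v.take 8 = (v.drop 0).take 8 := by simp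
  have hdp : v.drop 24 = (v.drop 24).take 12 :=
    (List.take_of_length_le (by simp [h36])).symm
  constructor
  · intro hpt
    have hdash : ∀ (i : Nat) (hi : i < v.length),
        pvT36[i]'(hlen ▸ hi) = '-' → v[i] = '-' := by
      intro i hi ht
      have h1 := hpt i hi
      rw [pvTpl, ht, if_pos rfl] at h1
      simpa using h1
    have hx : ∀ (i : Nat) (hi : i < v.length), i ≠ 8 → i ≠ 13 → i ≠ 18 → i ≠ 23 →
        PySem.Chars.lowerChar v[i] ∈ pyBHexList := by
      intro i hi n8 n13 n18 n23
      have ht := pvT36_x i (by omega) n8 n13 n18 n23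
      rw [pv_getD_eq pvT36 i (hlen ▸ hi) ' '] at ht
      have h1 := hpt i hi
      rw [pvTpl, ht] at h1
      simpa using h1
    have hhex : ∀ (s t : Nat), (∀ i, s ≤ i → i - s < t →
          i ≠ 8 ∧ i ≠ 13 ∧ i ≠ 18 ∧ i ≠ 23) →
        pvAllHex ((v.drop s).take t) = true := by
      intro s t hreg
      rw [pv_allhex_iff]
      intro c hc
      obtain ⟨i, h, his, hit, rfl⟩ := pv_mem_part v s t c hc
      obtain ⟨n8, n13, n18, n23⟩ := hreg i his hit
      exact hx i h n8 n13 n18 n23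
    refine ⟨?_, ?_, ?_, ?_, ?_, ?_, ?_, ?_, ?_⟩
    · rw [pv_getD_eq v 8 (by omega) ' ']
      exact hdash 8 (by omega) pvT36_dashes.1
    · rw [pv_getD_eq v 13 (by omega) ' ']
      exact hdash 13 (by omega) pvT36_dashes.2.1
    · rw [pv_getD_eq v 18 (by omega) ' ']
      exact hdash 18 (by omega) pvT36_dashes.2.2.1
    · rw [pv_getD_eq v 23 (by omega) ' ']
      exact hdash 23 (by omega) pvT36_dashes.2.2.2
    · rw [htk]; exact hhex 0 8 (by intro i h1 h2; omega)
    · exact hhex 9 4 (by intro i h1 h2; omega)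
    · exact hhex 14 4 (by intro i h1 h2; omega)
    · exact hhex 19 4 (by intro i h1 h2; omega)
    · rw [hdp]; exact hhex 24 12 (by intro i h1 h2; omega)
  · rintro ⟨g8, g13, g18, g23, a0, a1, a2, a3, a4⟩ i hi
    rw [pv_getD_eq v 8 (by omega) ' '] at g8
    rw [pv_getD_eq v 13 (by omega) ' '] at g13
    rw [pv_getD_eq v 18 (by omega) ' '] at g18
    rw [pv_getD_eq v 23 (by omega) ' '] at g23
    rw [htk] at a0
    rw [hdp] at a4
    by_cases h8 : i = 8
    · subst h8
      rw [pvTpl, pvT36_dashes.1, if_pos rfl]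
      simpa using g8
    · by_cases h13 : i = 13
      · subst h13
        rw [pvTpl, pvT36_dashes.2.1, if_pos rfl]
        simpa using g13
      · by_cases h18 : i = 18
        · subst h18
          rw [pvTpl, pvT36_dashes.2.2.1, if_pos rfl]
          simpa using g18
        · by_cases h23 : i = 23
          · subst h23
            rw [pvTpl, pvT36_dashes.2.2.2, if_pos rfl]
            simpa using g23
          · have ht := pvT36_x i (by omega) h8 h13 h18 h23
            rw [pv_getD_eq pvT36 i (hlen ▸ hi) ' '] at ht
            rw [pvTpl, ht]
            have hmem : ∃ s t : Nat, pvAllHex ((v.drop s).take t) = true ∧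
                s ≤ i ∧ i - s < t := by
              rcases Nat.lt_or_ge i 8 with h | h
              · exact ⟨0, 8, a0, by omega, by omega⟩
              · rcases Nat.lt_or_ge i 13 with h' | h'
                · exact ⟨9, 4, a1, by omega, by omega⟩
                · rcases Nat.lt_or_ge i 18 with h'' | h''
                  · exact ⟨14, 4, a2, by omega, by omega⟩
                  · rcases Nat.lt_or_ge i 23 with h3 | h3
                    · exact ⟨19, 4, a3, by omega, by omega⟩
                    · exact ⟨24, 12, a4, by omega, by omega⟩
            obtain ⟨s, t, ha, his, hit⟩ := hmem
            have := (pv_allhex_iff _).mp ha v[i] (pv_part_mem v s t i his hit (by omega))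
            simpa using this

theorem guid_chker_main (val : String) : guid_chker val = guid_chker_alt val := by
  unfold guid_chker guid_chker_alt
  by_cases h0 : val.toList = []
  · simp [h0]
  · rw [if_neg h0, if_neg h0]
    simp only [pv_strip_strip]
    generalize PySem.Chars.strip val.toList = v
    rw [pv_get_tpl v.length]
    by_cases h36 : v.length = 36
    · rw [if_neg (show ¬(v.length ≠ 32 ∧ v.length ≠ 36) by omega), if_pos h36,
          if_neg (show ¬v.length = 32 by omega), if_pos h36]
      show _ = (v.zip pvT36).all pvTpl
      rw [pv_splitOn_eq v, Bool.eq_iff_iff, pv_ifs_iff, pv_zip36 v h36]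
      constructor
      · rintro ⟨h5, hlen, hcnt⟩
        rw [not_not] at h5
        push Not at hlen hcnt
        obtain ⟨a, b, c, d, e, hl⟩ := pv_len5 _ h5
        have hv : v = a ++ '-' :: (b ++ '-' :: (c ++ '-' :: (d ++ '-' :: e))) := by
          have hj := pv_join_split v []
          rw [hl] at hj
          simp only [pvJoinDash, List.reverse_nil, List.nil_append] at hj
          exact hj.symm
        rw [hl] at hlen
        simp only [List.getD] at hlen
        obtain ⟨l0, l1, l2, l3, l4⟩ : a.length = 8 ∧ b.length = 4 ∧ c.length = 4 ∧
            d.length = 4 ∧ e.length = 12 := by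
          simpa using hlen
        rw [hv] at hcnt
        have hhex := (pv_count_iff a b c d e l0 l1 l2 l3 l4).mp hcnt
        obtain ⟨d8, d13, d18, d23, t0, t1, t2, t3, t4⟩ :=
          pv_parts v a b c d e hv l0 l1 l2 l3
        rw [t0, t1, t2, t3, t4]
        exact ⟨d8, d13, d18, d23, hhex.1, hhex.2.1, hhex.2.2.1, hhex.2.2.2.1, hhex.2.2.2.2⟩
      · rintro ⟨d8, d13, d18, d23, a0, a1, a2, a3, a4⟩
        obtain ⟨hv, l0, l1, l2, l3, l4⟩ := pv_decomp_rev v h36 d8 d13 d18 d23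
        have hsplit : pvSplit v [] = [v.take 8, (v.drop 9).take 4, (v.drop 14).take 4,
            (v.drop 19).take 4, v.drop 24] := by
          conv_lhs => rw [hv]
          exact pv_split_decomp _ _ _ _ _
            (pv_nodash_of_all _ a0) (pv_nodash_of_all _ a1)
            (pv_nodash_of_all _ a2) (pv_nodash_of_all _ a3)
            (pv_nodash_of_all _ a4)
        refine ⟨by rw [hsplit]; simp, ?_, ?_⟩
        · rw [hsplit]
          push Not
          simp only [List.getD]
          simp [l0, l1, l2, l3, l4]
        · rw [not_not]
          conv_lhs => rw [hv]
          exact (pv_count_iff _ _ _ _ _ l0 l1 l2 l3 l4).mpr ⟨a0, a1, a2, a3, a4⟩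
    · by_cases h32 : v.length = 32
      · rw [if_neg (show ¬(v.length ≠ 32 ∧ v.length ≠ 36) by omega), if_neg h36,
            if_neg (show ¬(true = false) by simp), if_pos h32]
        show _ = (v.zip pvT32).all pvTpl
        rw [pv_zip32 v h32, pvAllHex]
        have hl : (PySem.Chars.lower v).length = 32 := by
          rw [pv_lower_length, h32]
        have key := pv_grp (PySem.Chars.lower v)
        rw [hl] at key
        rcases Bool.eq_false_or_eq_true
            ((PySem.Chars.lower v).all (fun c => decide (c ∈ pyBHexList))) with hb | hb <;> rw [hb]
        · rw [if_neg]
          simp only [ne_eq, not_not]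
          exact key.mpr hb
        · rw [if_pos]
          intro hc
          rw [key] at hc
          rw [hc] at hb
          simp at hb
      · rw [if_pos ⟨h32, h36⟩, if_neg h32, if_neg h36]

-- ===== VERDICT (by name: the statement is the Claim_ definition above) =====
theorem guid_chker_spec : Claim_equal_guid_chker := by
  intro val _
  unfold Spec_guid_chker
  exact guid_chker_main val
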